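-- pv_equiv track=rewrite | github.com/EvansKCCR/Schistosoma-Integrin-modelling | 01_integrin_detection_classification/scripts/integrin_alpha_scan_and_classify.py | has_signal_peptide
-- ===== SOURCE A (Python) =====
-- HYDRO_TM = set("AILMVFWY")
--
-- def has_signal_peptide(seq: str, n_first: int = 30, min_run: int = 7) -> bool:
--     n = seq[:n_first]
--     run = maxrun = 0
--     for c in n:
--         if c in HYDRO_TM:
--             run += 1
--             if run > maxrun:
--                 maxrun = run
--         else:
--             run = 0
--     return maxrun >= min_run
-- ===== SOURCE B (Python) =====
-- HYDRO_TM = set("AILMVFWY")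
--
-- def has_signal_peptide(seq: str, n_first: int = 30, min_run: int = 7) -> bool:
--     prefix = seq[:n_first]
--     return any(all(c in HYDRO_TM for c in prefix[i:i + min_run])
--                for i in range(len(prefix) - min_run + 1))
-- ===== Notes on version B (the rewrite author's own statement) =====
-- stated objective: alternative
-- what changed: Replaces the running-counter state machine with a declarative sliding-window test: any window of min_run consecutive characters of the prefix consisting only of hydrophobic residues.
import Mathlib
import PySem

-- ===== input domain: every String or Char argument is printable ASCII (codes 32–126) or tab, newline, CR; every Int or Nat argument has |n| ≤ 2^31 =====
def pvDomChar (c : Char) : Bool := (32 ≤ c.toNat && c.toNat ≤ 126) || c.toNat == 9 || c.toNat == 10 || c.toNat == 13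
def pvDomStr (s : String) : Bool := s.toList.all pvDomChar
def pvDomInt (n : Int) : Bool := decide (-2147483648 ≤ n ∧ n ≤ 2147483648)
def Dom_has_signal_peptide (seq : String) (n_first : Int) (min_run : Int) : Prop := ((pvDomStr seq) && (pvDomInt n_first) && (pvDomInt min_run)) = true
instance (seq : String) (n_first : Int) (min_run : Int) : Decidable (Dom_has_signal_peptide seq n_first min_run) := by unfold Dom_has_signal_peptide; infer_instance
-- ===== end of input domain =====

-- B replaces A's running-counter state machine by a declarative sliding-window membership test
-- (any window of min_run consecutive prefix characters all hydrophobic); same cost class, alternative algorithm.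

-- ===== PORT A =====
-- HYDRO_TM = set("AILMVFWY")
def pvHYDRO_TM : List Char := PySem.Set.ofList "AILMVFWY".toList

-- one loop iteration of A: 'if c in HYDRO_TM: run += 1; maxrun = max …  else: run = 0'
def pvStepA (p : Int × Int) (c : Char) : Int × Int :=
  if pvHYDRO_TM.contains c then
    (p.1 + 1, if p.1 + 1 > p.2 then p.1 + 1 else p.2)
  else (0, p.2)

def has_signal_peptide (seq : String) (n_first : Int) (min_run : Int) : Bool :=
  let n := PySem.List.slice seq.toList none (some n_first)   -- seq[:n_first]
  let st := n.foldl pvStepA (0, 0)                           -- (run, maxrun)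
  decide (min_run ≤ st.2)                                    -- maxrun >= min_run

-- ===== PORT B =====
-- lazy 'any(p(i) for i in range(0, stop))': Python's generator stops at the first hit,
-- so the port iterates the index instead of materialising the range
def pvAnyRange (i stop : Int) (p : Int → Bool) : Bool :=
  if h : i < stop then p i || pvAnyRange (i + 1) stop p else false
termination_by (stop - i).toNat
decreasing_by omega

def has_signal_peptide_alt (seq : String) (n_first : Int) (min_run : Int) : Bool :=
  let pre := PySem.List.slice seq.toList none (some n_first)   -- seq[:n_first]
  -- any(all(c in HYDRO_TM for c in pre[i:i+min_run]) for i in range(len(pre) - min_run + 1))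
  pvAnyRange 0 ((pre.length : Int) - min_run + 1)
    (fun i => (PySem.List.slice pre (some i) (some (i + min_run))).all
      (fun c => pvHYDRO_TM.contains c))

-- ===== PRECONDITION & SPEC =====
def Spec_has_signal_peptide (seq : String) (n_first : Int) (min_run : Int) (out : Bool) : Prop := out = has_signal_peptide_alt seq n_first min_run
instance (seq : String) (n_first : Int) (min_run : Int) (out : Bool) : Decidable (Spec_has_signal_peptide seq n_first min_run out) := by unfold Spec_has_signal_peptide; infer_instance

-- ===== CLAIM (what is proved, stated in full; the proofs are below) =====
def Claim_equal_has_signal_peptide : Prop := ∀ (seq : String) (n_first : Int) (min_run : Int), Dom_has_signal_peptide seq n_first min_run → Spec_has_signal_peptide seq n_first min_run (has_signal_peptide seq n_first min_run)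

-- ===== LEMMAS AND PROOFS =====

-- the windows / boundary-run existential characterising A's fold from state (r, m)
def pvEx (k : Int) (l : List Char) (r : Int) : Prop :=
  (∃ j : Nat, j ≤ l.length ∧ k ≤ r + j ∧ ((l.take j).all (fun c => pvHYDRO_TM.contains c)) = true) ∨
  (∃ i : Nat, i + k.toNat ≤ l.length ∧ (((l.drop i).take k.toNat).all (fun c => pvHYDRO_TM.contains c)) = true)

-- maxrun never decreases along the fold
lemma pv_mono (l : List Char) : ∀ (r m : Int), m ≤ (l.foldl pvStepA (r, m)).2 := by
  induction l with
  | nil => intro r m; simp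
  | cons c t ih =>
    intro r m
    by_cases hc : pvHYDRO_TM.contains c = true
    · simp only [List.foldl_cons, pvStepA, hc, if_true]
      have h1 := ih (r + 1) (if r + 1 > m then r + 1 else m)
      have h2 : m ≤ (if r + 1 > m then r + 1 else m) := by split_ifs <;> omega
      omega
    · rw [List.foldl_cons, show pvStepA (r, m) c = (0, m) from by unfold pvStepA; rw [if_neg hc]]
      exact ih 0 m

lemma pv_all_take_of_le {l : List Char} {j k' : Nat} (hkj : k' ≤ j)
    (h : (l.take j).all (fun c => pvHYDRO_TM.contains c) = true) :
    (l.take k').all (fun c => pvHYDRO_TM.contains c) = true := by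
  rw [List.all_eq_true] at h ⊢
  intro x hx
  apply h
  have : l.take k' = (l.take j).take k' := by rw [List.take_take, Nat.min_eq_left hkj]
  rw [this] at hx
  exact List.mem_of_mem_take hx

-- key: A's fold from (r, m) with 0 ≤ r ≤ m reaches min_run iff m already did or a run/window exists
lemma pv_fold_iff (k : Int) (hk : 1 ≤ k) (l : List Char) :
    ∀ (r m : Int), 0 ≤ r → r ≤ m →
    (k ≤ (l.foldl pvStepA (r, m)).2 ↔ k ≤ m ∨ pvEx k l r) := by
  induction l with
  | nil =>
    intro r m hr hrm
    simp only [List.foldl_nil, pvEx]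
    constructor
    · exact fun h => Or.inl h
    · rintro (h | ⟨j, hj, hkj, _⟩ | ⟨i, hi, _⟩)
      · exact h
      · simp only [List.length_nil] at hj
        omega
      · simp only [List.length_nil] at hi
        omega
  | cons c t ih =>
    intro r m hr hrm
    by_cases hc : pvHYDRO_TM.contains c = true
    · simp only [List.foldl_cons, pvStepA, hc, if_true]
      rw [ih (r + 1) (if r + 1 > m then r + 1 else m) (by omega) (by split_ifs <;> omega)]
      constructor
      · rintro (h | ⟨j, hj, hkj, hall⟩ | ⟨i, hi, hall⟩)
        · split_ifs at h with h2
          · by_cases hm : k ≤ m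
            · exact Or.inl hm
            · refine Or.inr (Or.inl ⟨1, by simp, by push_cast; omega, ?_⟩)
              simp only [List.take_succ_cons, List.take_zero, List.all_cons, List.all_nil,
                Bool.and_true]
              exact hc
          · exact Or.inl h
        · refine Or.inr (Or.inl ⟨j + 1, by simp; omega, by push_cast at hkj ⊢; omega, ?_⟩)
          simp only [List.take_succ_cons, List.all_cons, Bool.and_eq_true]
          exact ⟨hc, hall⟩
        · refine Or.inr (Or.inr ⟨i + 1, by simp at hi ⊢; omega, ?_⟩)
          simpa [List.drop_succ_cons] using hall
      · rintro (h | ⟨j, hj, hkj, hall⟩ | ⟨i, hi, hall⟩)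
        · exact Or.inl (by split_ifs <;> omega)
        · match j with
          | 0 => exact Or.inl (by split_ifs <;> (push_cast at hkj; omega))
          | j' + 1 =>
            simp only [List.take_succ_cons, List.all_cons, Bool.and_eq_true] at hall
            refine Or.inr (Or.inl ⟨j', by simp at hj; omega, by push_cast at hkj ⊢; omega, hall.2⟩)
        · match i with
          | 0 =>
            have hk1 : k.toNat = (k.toNat - 1) + 1 := by omega
            rw [List.drop_zero, hk1, List.take_succ_cons, List.all_cons, Bool.and_eq_true] at hall
            refine Or.inr (Or.inl ⟨k.toNat - 1, by simp at hi; omega, ?_, hall.2⟩)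
            have : ((k.toNat : Int)) = k := by omega
            omega
          | i' + 1 =>
            refine Or.inr (Or.inr ⟨i', by simp at hi; omega, ?_⟩)
            simpa [List.drop_succ_cons] using hall
    · rw [List.foldl_cons, show pvStepA (r, m) c = (0, m) from by unfold pvStepA; rw [if_neg hc]]
      rw [ih 0 m le_rfl (by omega)]
      constructor
      · rintro (h | ⟨j, hj, hkj, hall⟩ | ⟨i, hi, hall⟩)
        · exact Or.inl h
        · -- a run of length j ≥ k at the very front of t: it is a window of t
          have hkj' : k.toNat ≤ j := by omega
          have hw : (t.take k.toNat).all (fun c => pvHYDRO_TM.contains c) = true :=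
            pv_all_take_of_le hkj' hall
          refine Or.inr (Or.inr ⟨1, by simp; omega, ?_⟩)
          simpa [List.drop_succ_cons] using hw
        · refine Or.inr (Or.inr ⟨i + 1, by simp at hi ⊢; omega, ?_⟩)
          simpa [List.drop_succ_cons] using hall
      · rintro (h | ⟨j, hj, hkj, hall⟩ | ⟨i, hi, hall⟩)
        · exact Or.inl h
        · match j with
          | 0 => exact Or.inl (by push_cast at hkj; omega)
          | j' + 1 =>
            simp only [List.take_succ_cons, List.all_cons, Bool.and_eq_true] at hall
            exact absurd hall.1 hc
        · match i with
          | 0 =>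
            have hk1 : k.toNat = (k.toNat - 1) + 1 := by omega
            rw [List.drop_zero, hk1, List.take_succ_cons, List.all_cons, Bool.and_eq_true] at hall
            exact absurd hall.1 hc
          | i' + 1 =>
            refine Or.inr (Or.inr ⟨i', by simp at hi; omega, ?_⟩)
            simpa [List.drop_succ_cons] using hall

-- the lazy any-over-range is the bounded existential
lemma pvAnyRange_eq_true (i stop : Int) (p : Int → Bool) :
    pvAnyRange i stop p = true ↔ ∃ j : Int, i ≤ j ∧ j < stop ∧ p j = true := by
  rw [pvAnyRange]
  split_ifs with h
  · rw [Bool.or_eq_true, pvAnyRange_eq_true (i + 1) stop p]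
    constructor
    · rintro (hp | ⟨j, h1, h2, hp⟩)
      · exact ⟨i, le_rfl, h, hp⟩
      · exact ⟨j, by omega, h2, hp⟩
    · rintro ⟨j, h1, h2, hp⟩
      by_cases hij : j = i
      · exact Or.inl (hij ▸ hp)
      · exact Or.inr ⟨j, by omega, h2, hp⟩
  · simp only [false_iff]
    rintro ⟨j, h1, h2, _⟩
    omega
termination_by (stop - i).toNat
decreasing_by omega

-- the two programs agree on every prefix list and every min_run
lemma pv_main (l : List Char) (k : Int) :
    (decide (k ≤ (l.foldl pvStepA (0, 0)).2)) =
    pvAnyRange 0 ((l.length : Int) - k + 1)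
      (fun i => (PySem.List.slice l (some i) (some (i + k))).all
        (fun c => pvHYDRO_TM.contains c)) := by
  by_cases hk : 1 ≤ k
  · rw [Bool.eq_iff_iff, decide_eq_true_iff, pvAnyRange_eq_true,
        pv_fold_iff k hk l 0 0 le_rfl le_rfl]
    constructor
    · rintro (h | ⟨j, hj, hkj, hall⟩ | ⟨i, hi, hall⟩)
      · omega
      · have hkj' : k.toNat ≤ j := by omega
        refine ⟨0, by omega, by omega, ?_⟩
        · have : PySem.List.slice l (some 0) (some (0 + k)) = l.take k.toNat := by
            rw [PySem.List.slice_toNat l le_rfl (by omega)]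
            simp
          rw [this]
          exact pv_all_take_of_le hkj' hall
      · refine ⟨(i : Int), by omega, by omega, ?_⟩
        · have : PySem.List.slice l (some (i : Int)) (some ((i : Int) + k)) =
              (l.drop i).take k.toNat := by
            rw [PySem.List.slice_toNat l (by omega) (by omega)]
            congr 1
            omega
          rw [this]; exact hall
    · rintro ⟨i, hi0, hilt, hall⟩
      refine Or.inr (Or.inr ⟨i.toNat, by omega, ?_⟩)
      have : PySem.List.slice l (some i) (some (i + k)) = (l.drop i.toNat).take k.toNat := by
        rw [PySem.List.slice_toNat l (by omega) (by omega)]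
        congr 1
        omega
      rw [this] at hall; exact hall
  · -- min_run ≤ 0: A returns True (maxrun ≥ 0), and B's window at i = len - min_run is empty
    rw [Bool.eq_iff_iff, decide_eq_true_iff]
    constructor
    · intro _
      rw [pvAnyRange_eq_true]
      refine ⟨(l.length : Int) - k, by omega, by omega, ?_⟩
      · have : PySem.List.slice l (some ((l.length : Int) - k)) (some ((l.length : Int) - k + k)) = [] := by
          rw [PySem.List.slice_toNat l (by omega) (by omega)]
          rw [List.drop_eq_nil_of_le (by omega)]
          simp
        rw [this]; rfl
    · intro _
      have := pv_mono l 0 0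
      omega

-- ===== VERDICT (by name: the statement is the Claim_ definition above) =====
theorem has_signal_peptide_spec : Claim_equal_has_signal_peptide := by
  intro seq n_first min_run _
  unfold Spec_has_signal_peptide has_signal_peptide has_signal_peptide_alt
  exact pv_main (PySem.List.slice seq.toList none (some n_first)) min_run
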